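-- pv_equiv track=rewrite | github.com/VarunNalla134/GROUP_132-HIT_ASSIGNMENT | Chamber_strings.py | separate_and_convert
-- ===== SOURCE A (Python) =====
-- def separate_and_convert(s):
--     # Initialize two empty lists to store the number and letter substrings
--     num_list = []
--     letter_list = []
--
--     # Loop through the string 's'
--     for char in s:
--         # If the character is a digit, append it to the number list
--         if char.isdigit():
--             num_list.append(char)
--         # If the character is a letter, append its lowercase equivalent to the letter list
--         elif char.isalpha():
--             letter_list.append(char.lower())
--
--     # Convert the number list to a list of integers
--     num_list = [int(num) for num in num_list]
--
--     # Convert the letter list to a list of ASCII codes for even-indexed letters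
--     letter_list = [ord(char) for idx, char in enumerate(letter_list) if idx % 2 == 0]
--
--     # Initialize two empty lists to store the ASCII codes for even numbers and even-indexed letters
--     num_ascii_list = []
--     letter_ascii_list = []
--
--     # Append the ASCII codes for even numbers to 'num_ascii_list'
--     num_ascii_list = [ord(str(num)) for num in num_list if num % 2 == 0]
--
--     # Append the ASCII codes for even-indexed letters to 'letter_ascii_list'
--     letter_ascii_list = [ascii_code for ascii_code in letter_list]
--
--     # Return the two lists, 'num_ascii_list' and 'letter_ascii_list'
--     return num_ascii_list, letter_ascii_list
-- ===== SOURCE B (Python) =====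
-- def separate_and_convert(s):
--     nums = []
--     letters = []
--     letter_idx = 0
--     for char in s:
--         if char.isdigit():
--             if int(char) % 2 == 0:
--                 nums.append(ord(char))
--         elif char.isalpha():
--             if letter_idx % 2 == 0:
--                 letters.append(ord(char.lower()))
--             letter_idx += 1
--     return nums, letters
-- ===== Notes on version B (the rewrite author's own statement) =====
-- stated objective: simpler
-- what changed: A's four staged passes (collect chars, int-convert, enumerate-filter, two comprehension rebuilds) are fused into one traversal maintaining a letter counter, appending ASCII codes directly.
import Mathlib
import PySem

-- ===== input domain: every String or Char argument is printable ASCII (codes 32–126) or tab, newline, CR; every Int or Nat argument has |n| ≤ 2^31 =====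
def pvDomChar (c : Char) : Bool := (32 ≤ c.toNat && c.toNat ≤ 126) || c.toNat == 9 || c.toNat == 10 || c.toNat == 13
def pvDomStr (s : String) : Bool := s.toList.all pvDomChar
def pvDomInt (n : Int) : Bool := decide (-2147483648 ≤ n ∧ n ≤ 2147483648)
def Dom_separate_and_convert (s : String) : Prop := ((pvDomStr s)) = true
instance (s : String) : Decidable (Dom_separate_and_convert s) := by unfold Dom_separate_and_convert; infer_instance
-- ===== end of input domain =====

-- B fuses A's four staged passes into a single traversal with a letter counter (objective: simpler).


-- ===== PORT A =====
-- A, step for step: char-collecting loop, then the three list comprehensions.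
def separate_and_convert (s : String) : List Int × List Int :=
  -- loop: num_list (digit chars), letter_list (lowercased letter chars)
  let pair := s.toList.foldl (fun (acc : List Char × List Char) char =>
    if PySem.Chars.isdigit char then (acc.1 ++ [char], acc.2)
    else if PySem.Chars.isalpha char then (acc.1, acc.2 ++ [PySem.Chars.lowerChar char])
    else acc) ([], [])
  -- num_list = [int(num) for num in num_list]  (each num is one digit char, so int() succeeds)
  let num_list : List Int := pair.1.map (fun c => (PySem.Int.ofChars? [c]).getD 0)
  -- letter_list = [ord(char) for idx, char in enumerate(letter_list) if idx % 2 == 0]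
  let letter_list : List Int :=
    ((PySem.List.enumerate pair.2 0).filter (fun p => PySem.Int.mod p.1 2 == 0)).map
      (fun p => (p.2.toNat : Int))
  -- num_ascii_list = [ord(str(num)) for num in num_list if num % 2 == 0]
  -- (num ∈ 0..9, so str(num) is one char and ord takes it; headD is exact there)
  let num_ascii_list : List Int := (num_list.filter (fun n => PySem.Int.mod n 2 == 0)).map
      (fun n => (((PySem.Int.toChars n).headD ' ').toNat : Int))
  (num_ascii_list, letter_list)

-- ===== PORT B =====
-- B: one fold over the characters; state = (nums, letters, letter_idx).
def separate_and_convert_alt (s : String) : List Int × List Int :=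
  let st := s.toList.foldl (fun (st : List Int × List Int × Int) char =>
    if PySem.Chars.isdigit char then
      if PySem.Int.mod ((char.toNat : Int) - 48) 2 == 0 then
        (st.1 ++ [(char.toNat : Int)], st.2.1, st.2.2)
      else st
    else if PySem.Chars.isalpha char then
      (st.1,
       (if PySem.Int.mod st.2.2 2 == 0 then st.2.1 ++ [((PySem.Chars.lowerChar char).toNat : Int)]
        else st.2.1),
       st.2.2 + 1)
    else st) ([], [], (0 : Int))
  (st.1, st.2.1)

-- ===== PRECONDITION & SPEC =====
def Spec_separate_and_convert (s : String) (out : List Int × List Int) : Prop := out = separate_and_convert_alt s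
instance (s : String) (out : List Int × List Int) : Decidable (Spec_separate_and_convert s out) := by unfold Spec_separate_and_convert; infer_instance

-- ===== CLAIM (what is proved, stated in full; the proofs are below) =====
def Claim_equal_separate_and_convert : Prop := ∀ (s : String), Dom_separate_and_convert s → Spec_separate_and_convert s (separate_and_convert s)

-- ===== LEMMAS AND PROOFS =====

-- A's digit chars and lowered letter chars (branch order as in both loops)
def aDig : List Char → List Char
  | [] => []
  | c :: cs => if PySem.Chars.isdigit c then c :: aDig cs
               else aDig cs
def aLet : List Char → List Char
  | [] => []
  | c :: cs => if PySem.Chars.isdigit c then aLet cs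
               else if PySem.Chars.isalpha c then PySem.Chars.lowerChar c :: aLet cs
               else aLet cs
-- B's contributions: nums, and letters starting from counter k
def bNum : List Char → List Int
  | [] => []
  | c :: cs => if PySem.Chars.isdigit c then
                 (if PySem.Int.mod ((c.toNat : Int) - 48) 2 == 0 then [(c.toNat : Int)] else [])
                   ++ bNum cs
               else bNum cs
def bLet (k : Int) : List Char → List Int
  | [] => []
  | c :: cs => if PySem.Chars.isdigit c then bLet k cs
               else if PySem.Chars.isalpha c then
                 (if PySem.Int.mod k 2 == 0 then [((PySem.Chars.lowerChar c).toNat : Int)] else [])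
                   ++ bLet (k + 1) cs
               else bLet k cs
-- even-index selection starting at k
def evenSel (k : Int) : List Char → List Int
  | [] => []
  | c :: cs => (if PySem.Int.mod k 2 == 0 then [(c.toNat : Int)] else []) ++ evenSel (k + 1) cs

theorem foldA_eq (cs : List Char) (a b : List Char) :
    cs.foldl (fun (acc : List Char × List Char) char =>
      if PySem.Chars.isdigit char then (acc.1 ++ [char], acc.2)
      else if PySem.Chars.isalpha char then (acc.1, acc.2 ++ [PySem.Chars.lowerChar char])
      else acc) (a, b) = (a ++ aDig cs, b ++ aLet cs) := by
  induction cs generalizing a b with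
  | nil => simp [aDig, aLet]
  | cons c cs ih =>
      simp only [List.foldl_cons, aDig, aLet]
      by_cases h1 : PySem.Chars.isdigit c = true
      · simp only [if_pos h1, ih, List.append_assoc, List.singleton_append]
      · by_cases h2 : PySem.Chars.isalpha c = true
        · simp only [if_neg h1, if_pos h2, ih, List.append_assoc, List.singleton_append]
        · simp only [if_neg h1, if_neg h2, ih]

theorem foldB_eq (cs : List Char) (n l : List Int) (k : Int) :
    cs.foldl (fun (st : List Int × List Int × Int) char =>
      if PySem.Chars.isdigit char then
        if PySem.Int.mod ((char.toNat : Int) - 48) 2 == 0 then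
          (st.1 ++ [(char.toNat : Int)], st.2.1, st.2.2)
        else st
      else if PySem.Chars.isalpha char then
        (st.1,
         (if PySem.Int.mod st.2.2 2 == 0 then st.2.1 ++ [((PySem.Chars.lowerChar char).toNat : Int)]
          else st.2.1),
         st.2.2 + 1)
      else st) (n, l, k) = (n ++ bNum cs, l ++ bLet k cs, k + (aLet cs).length) := by
  induction cs generalizing n l k with
  | nil => simp [bNum, bLet, aLet]
  | cons c cs ih =>
      simp only [List.foldl_cons, bNum, bLet, aLet]
      by_cases h1 : PySem.Chars.isdigit c = true
      · by_cases h2 : (PySem.Int.mod ((c.toNat : Int) - 48) 2 == 0) = true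
        · simp only [if_pos h1, if_pos h2, ih, List.append_assoc, List.singleton_append]
        · simp only [if_pos h1, if_neg h2, ih, List.nil_append]
      · by_cases h3 : PySem.Chars.isalpha c = true
        · by_cases h4 : (PySem.Int.mod k 2 == 0) = true
          · simp only [if_neg h1, if_pos h3, if_pos h4, ih, List.append_assoc,
              List.singleton_append, List.length_cons, Prod.mk.injEq]
            refine ⟨trivial, trivial, by push_cast; omega⟩
          · simp only [if_neg h1, if_pos h3, if_neg h4, ih, List.nil_append,
              List.length_cons, Prod.mk.injEq]
            refine ⟨trivial, trivial, by push_cast; omega⟩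
        · simp only [if_neg h1, if_neg h3, ih]

-- A's enumerate/filter/map over a letter list is even-index selection
theorem enum_evenSel (ls : List Char) (k : Int) :
    ((PySem.List.enumerate ls k).filter (fun p => PySem.Int.mod p.1 2 == 0)).map
      (fun p => (p.2.toNat : Int)) = evenSel k ls := by
  induction ls generalizing k with
  | nil => simp [PySem.List.enumerate_nil, evenSel]
  | cons c ls ih =>
      rw [PySem.List.enumerate_cons]
      simp only [List.filter_cons, evenSel]
      by_cases h : (PySem.Int.mod k 2 == 0) = true
      · simp only [h, if_pos, List.map_cons, ih, List.singleton_append]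
      · simp only [h, List.nil_append, ih, if_false, Bool.false_eq_true]

-- B's letter stream is even-index selection over A's letter chars
theorem bLet_evenSel (cs : List Char) (k : Int) :
    bLet k cs = evenSel k (aLet cs) := by
  induction cs generalizing k with
  | nil => rfl
  | cons c cs ih =>
      simp only [bLet, aLet]
      by_cases h1 : PySem.Chars.isdigit c = true
      · simp only [if_pos h1, ih]
      · by_cases h2 : PySem.Chars.isalpha c = true
        · simp only [if_neg h1, if_pos h2, ih, evenSel]
        · simp only [if_neg h1, if_neg h2, ih]

-- the ten digit characters
theorem digit_cases (c : Char) (h : PySem.Chars.isdigit c = true) :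
    c = '0' ∨ c = '1' ∨ c = '2' ∨ c = '3' ∨ c = '4' ∨ c = '5' ∨ c = '6' ∨ c = '7' ∨ c = '8' ∨ c = '9' := by
  simp only [PySem.Chars.isdigit, Bool.and_eq_true, decide_eq_true_eq, Char.le_def,
    UInt32.le_iff_toNat_le] at h
  obtain ⟨h1, h2⟩ := h
  have hc : Char.ofNat c.toNat = c := Char.ofNat_toNat c
  have lo : 48 ≤ c.toNat := by exact_mod_cast h1
  have hi : c.toNat ≤ 57 := by exact_mod_cast h2
  rw [← hc]
  set m := c.toNat with hm
  clear_value m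
  interval_cases m <;> simp

-- per-digit facts: int(c) = c-48; ord(str(int(c))) = ord(c)
theorem int_of_digit (c : Char) (h : PySem.Chars.isdigit c = true) :
    (PySem.Int.ofChars? [c]).getD 0 = (c.toNat : Int) - 48 := by
  rcases digit_cases c h with h|h|h|h|h|h|h|h|h|h <;> subst h <;> decide

theorem ord_str_of_digit (c : Char) (h : PySem.Chars.isdigit c = true) :
    (((PySem.Int.toChars ((c.toNat : Int) - 48)).headD ' ').toNat : Int) = (c.toNat : Int) := by
  rcases digit_cases c h with h|h|h|h|h|h|h|h|h|h <;> subst h <;> decide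

-- A's number pipeline over its digit chars equals B's number stream
theorem num_pipeline (cs : List Char) :
    (((aDig cs).map (fun c => (PySem.Int.ofChars? [c]).getD 0)).filter
        (fun n => PySem.Int.mod n 2 == 0)).map
      (fun n => (((PySem.Int.toChars n).headD ' ').toNat : Int)) = bNum cs := by
  induction cs with
  | nil => rfl
  | cons c cs ih =>
      simp only [aDig, bNum]
      by_cases h1 : PySem.Chars.isdigit c = true
      · simp only [if_pos h1, List.map_cons, List.filter_cons, int_of_digit c h1]
        by_cases h2 : (PySem.Int.mod ((c.toNat : Int) - 48) 2 == 0) = true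
        · simp only [h2, if_true, List.map_cons, ih, ord_str_of_digit c h1, List.singleton_append]
        · simp only [h2, if_false, ih, List.nil_append, Bool.false_eq_true]
      · simp only [if_neg h1, ih]

-- ===== VERDICT (by name: the statement is the Claim_ definition above) =====
theorem separate_and_convert_spec : Claim_equal_separate_and_convert := by
  intro s _
  unfold Spec_separate_and_convert
  simp only [separate_and_convert, separate_and_convert_alt, foldA_eq, foldB_eq, List.nil_append]
  rw [num_pipeline, enum_evenSel, bLet_evenSel]
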